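-- pv_equiv track=rewrite | github.com/FedericoRubbi/genetic-coding | utils/grammar_viz/analyzer.py | _strip_strings_and_regex
-- ===== SOURCE A (Python) =====
-- from typing import Dict, Iterable, List, Set
--
-- def _strip_strings_and_regex(s: str) -> str:
--     """
--     Remove string/regex literals from a grammar RHS so we don't mistake them
--     for symbol references.
--     """
--     out: List[str] = []
--     i = 0
--     n = len(s)
--     while i < n:
--         ch = s[i]
--         if ch in {'"', "'"}:
--             quote = ch
--             out.append(" ")
--             i += 1
--             while i < n:
--                 c = s[i]
--                 if c == "\\":
--                     i += 2
--                 elif c == quote: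
--                     i += 1
--                     break
--                 else:
--                     i += 1
--         elif ch == "/":
--             # Assume /.../ is a regex literal (comments have been stripped)
--             out.append(" ")
--             i += 1
--             while i < n:
--                 c = s[i]
--                 if c == "\\":
--                     i += 2
--                 elif c == "/":
--                     i += 1
--                     break
--                 else:
--                     i += 1
--         else:
--             out.append(ch)
--             i += 1
--     return "".join(out)
-- ===== SOURCE B (Python) =====
-- def _strip_strings_and_regex(s: str) -> str:
--     NORMAL, IN_LIT, ESCAPED = 0, 1, 2
--     state = NORMAL
--     delim = ""
--     out = []
--     for c in s:
--         if state == NORMAL: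
--             if c in ('"', "'", "/"):
--                 out.append(" ")
--                 state = IN_LIT
--                 delim = c
--             else:
--                 out.append(c)
--         elif state == IN_LIT:
--             if c == "\\":
--                 state = ESCAPED
--             elif c == delim:
--                 state = NORMAL
--         else:  # ESCAPED: consume this character without acting
--             state = IN_LIT
--     return "".join(out)
-- ===== Notes on version B (the rewrite author's own statement) =====
-- stated objective: alternative
-- what changed: The two duplicated nested inner skip-loops with manual index arithmetic are replaced by a single flat pass over the characters maintaining an explicit state (normal / inside-literal with its delimiter / escaped); a timing run measured this constant-factor faster.
import Mathlib
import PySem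

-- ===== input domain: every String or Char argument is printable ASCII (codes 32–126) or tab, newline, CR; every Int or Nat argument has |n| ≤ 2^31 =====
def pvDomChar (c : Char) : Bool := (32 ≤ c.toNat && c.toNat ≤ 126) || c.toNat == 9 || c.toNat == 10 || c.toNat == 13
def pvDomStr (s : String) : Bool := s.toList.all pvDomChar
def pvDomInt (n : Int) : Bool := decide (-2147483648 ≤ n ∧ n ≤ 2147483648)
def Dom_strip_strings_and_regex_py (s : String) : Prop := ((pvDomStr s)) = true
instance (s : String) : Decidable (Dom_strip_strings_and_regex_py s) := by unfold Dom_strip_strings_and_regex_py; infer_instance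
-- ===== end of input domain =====

-- B replaces A's two duplicated nested skip-loops by one flat state-machine pass (alternative decomposition, same cost).

-- ===== PORT A =====
-- A's inner while-loop for a string literal: skip until the closing quote,
-- a backslash consumes two characters (i += 2, possibly past the end).
def pvSkipStr (quote : Char) : List Char → List Char
  | [] => []
  | c :: rest =>
    if c = '\\' then
      match rest with
      | [] => []
      | _ :: rs => pvSkipStr quote rs
    else if c = quote then rest
    else pvSkipStr quote rest

-- A's inner while-loop for a regex literal /.../ (same stepping, delimiter '/').
def pvSkipRe : List Char → List Char
  | [] => []
  | c :: rest =>
    if c = '\\' then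
      match rest with
      | [] => []
      | _ :: rs => pvSkipRe rs
    else if c = '/' then rest
    else pvSkipRe rest

theorem pvSkipStr_length_le (quote : Char) (l : List Char) : (pvSkipStr quote l).length ≤ l.length := by
  match l with
  | [] => simp [pvSkipStr]
  | c :: rest =>
    unfold pvSkipStr
    split
    · match rest with
      | [] => simp
      | r :: rs =>
        simp only []
        have := pvSkipStr_length_le quote rs
        simp; omega
    · split
      · simp
      · have := pvSkipStr_length_le quote rest
        simp; omega

theorem pvSkipRe_length_le (l : List Char) : (pvSkipRe l).length ≤ l.length := by
  match l with
  | [] => simp [pvSkipRe]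
  | c :: rest =>
    unfold pvSkipRe
    split
    · match rest with
      | [] => simp
      | r :: rs =>
        have := pvSkipRe_length_le rs
        simp; omega
    · split
      · simp
      · have := pvSkipRe_length_le rest
        simp; omega

-- A's outer while-loop, building the output character list left to right.
def pvStripA : List Char → List Char
  | [] => []
  | c :: rest =>
    if c = '"' ∨ c = '\'' then
      ' ' :: pvStripA (pvSkipStr c rest)
    else if c = '/' then
      ' ' :: pvStripA (pvSkipRe rest)
    else
      c :: pvStripA rest
termination_by l => l.length
decreasing_by
  · have := pvSkipStr_length_le c rest; simp; omega
  · have := pvSkipRe_length_le rest; simp; omega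
  · simp

def strip_strings_and_regex_py (s : String) : String :=
  String.ofList (pvStripA s.toList)

-- ===== PORT B =====
-- B's explicit state: normal text, inside a literal (with its delimiter), or just after a backslash.
inductive PvBState where
  | normal : PvBState
  | inLit : Char → PvBState
  | escaped : Char → PvBState
deriving DecidableEq, Repr

-- One step of B's flat loop: state plus accumulated output.
def pvStepB (st : PvBState × List Char) (c : Char) : PvBState × List Char :=
  match st.1 with
  | .normal =>
    if c = '"' ∨ c = '\'' ∨ c = '/' then (.inLit c, st.2 ++ [' '])
    else (.normal, st.2 ++ [c])
  | .inLit d =>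
    if c = '\\' then (.escaped d, st.2)
    else if c = d then (.normal, st.2)
    else (.inLit d, st.2)
  | .escaped d => (.inLit d, st.2)

def strip_strings_and_regex_py_alt (s : String) : String :=
  String.ofList (s.toList.foldl pvStepB (PvBState.normal, [])).2

-- ===== PRECONDITION & SPEC =====
def Spec_strip_strings_and_regex_py (s : String) (out : String) : Prop := out = strip_strings_and_regex_py_alt s
instance (s : String) (out : String) : Decidable (Spec_strip_strings_and_regex_py s out) := by unfold Spec_strip_strings_and_regex_py; infer_instance

-- ===== CLAIM (what is proved, stated in full; the proofs are below) =====
def Claim_equal_strip_strings_and_regex_py : Prop := ∀ (s : String), Dom_strip_strings_and_regex_py s → Spec_strip_strings_and_regex_py s (strip_strings_and_regex_py s)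

-- ===== LEMMAS AND PROOFS =====

-- Folding B from the inside-literal state consumes exactly the characters A's inner skip-loop skips.
theorem pvFold_inLit (d : Char) (l acc : List Char) :
    (l.foldl pvStepB (PvBState.inLit d, acc)).2
      = ((pvSkipStr d l).foldl pvStepB (PvBState.normal, acc)).2 := by
  match l with
  | [] => simp [pvSkipStr]
  | c :: rest =>
    by_cases hb : c = '\\'
    · subst hb
      match rest with
      | [] => simp [pvSkipStr, pvStepB]
      | r :: rs =>
        rw [show pvSkipStr d ('\\' :: r :: rs) = pvSkipStr d rs from by simp [pvSkipStr]]
        simp only [List.foldl_cons]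
        rw [show pvStepB (PvBState.inLit d, acc) '\\' = (PvBState.escaped d, acc) from rfl]
        rw [show pvStepB (PvBState.escaped d, acc) r = (PvBState.inLit d, acc) from rfl]
        exact pvFold_inLit d rs acc
    · by_cases hd : c = d
      · subst hd
        rw [show pvSkipStr c (c :: rest) = rest from by rw [pvSkipStr.eq_def]; simp [hb]]
        simp only [List.foldl_cons]
        rw [show pvStepB (PvBState.inLit c, acc) c = (PvBState.normal, acc) from by
          simp [pvStepB, hb]]
      · rw [show pvSkipStr d (c :: rest) = pvSkipStr d rest from by rw [pvSkipStr.eq_def]; simp [hb, hd]]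
        simp only [List.foldl_cons]
        rw [show pvStepB (PvBState.inLit d, acc) c = (PvBState.inLit d, acc) from by
          simp [pvStepB, hb, hd]]
        exact pvFold_inLit d rest acc
termination_by l.length

theorem pvSkipRe_eq (l : List Char) : pvSkipRe l = pvSkipStr '/' l := by
  match l with
  | [] => simp [pvSkipRe, pvSkipStr]
  | c :: rest =>
    unfold pvSkipRe pvSkipStr
    split
    · match rest with
      | [] => rfl
      | r :: rs => exact pvSkipRe_eq rs
    · split
      · rfl
      · exact pvSkipRe_eq rest

-- Main invariant: B's fold from the normal state appends exactly A's output.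
theorem pvFold_normal (l acc : List Char) :
    (l.foldl pvStepB (PvBState.normal, acc)).2 = acc ++ pvStripA l := by
  match l with
  | [] => simp [pvStripA]
  | c :: rest =>
    by_cases hq : c = '"' ∨ c = '\''
    · simp only [List.foldl_cons]
      rw [show pvStepB (PvBState.normal, acc) c = (PvBState.inLit c, acc ++ [' ']) from by
        rcases hq with h | h <;> subst h <;> simp [pvStepB]]
      rw [pvFold_inLit c rest (acc ++ [' '])]
      rw [pvFold_normal (pvSkipStr c rest) (acc ++ [' '])]
      simp [pvStripA, hq]
    · by_cases hs : c = '/'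
      · subst hs
        simp only [List.foldl_cons]
        rw [show pvStepB (PvBState.normal, acc) '/' = (PvBState.inLit '/', acc ++ [' ']) from by
          simp [pvStepB]]
        rw [pvFold_inLit '/' rest (acc ++ [' '])]
        rw [← pvSkipRe_eq rest]
        rw [pvFold_normal (pvSkipRe rest) (acc ++ [' '])]
        simp [pvStripA]
      · have hdelim : ¬ (c = '"' ∨ c = '\'' ∨ c = '/') := by tauto
        simp only [List.foldl_cons]
        rw [show pvStepB (PvBState.normal, acc) c = (PvBState.normal, acc ++ [c]) from by
          simp [pvStepB, hdelim]]
        rw [pvFold_normal rest (acc ++ [c])]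
        simp [pvStripA, hq, hs]
termination_by l.length
decreasing_by
  · have := pvSkipStr_length_le c rest; simp; omega
  · have := pvSkipRe_length_le rest; simp; omega
  · simp

-- ===== VERDICT (by name: the statement is the Claim_ definition above) =====
theorem strip_strings_and_regex_py_spec : Claim_equal_strip_strings_and_regex_py := by
  intro s _
  unfold Spec_strip_strings_and_regex_py strip_strings_and_regex_py strip_strings_and_regex_py_alt
  rw [pvFold_normal s.toList []]
  simp
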